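-- pv_equiv track=rewrite | github.com/kasergus/rpiReport | py/bit.py | intToText
-- ===== SOURCE A (Python) =====
-- def intToText(integer):
--   mas = []
--   while integer > 0:
--     charCode = integer % 1000
--     char = chr(charCode)
--     integer //= 1000
--     mas.append(char)
--   return str(''.join(mas[::-1]))
-- ===== SOURCE B (Python) =====
-- def intToText(integer):
--   if integer <= 0:
--     return ''
--   p = 1
--   while integer // p >= 1000:
--     p *= 1000
--   chars = []
--   while p > 0:
--     chars.append(chr((integer // p) % 1000))
--     p //= 1000
--   return ''.join(chars)
-- ===== Notes on version B (the rewrite author's own statement) =====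
-- stated objective: alternative
-- what changed: B first finds the highest power of 1000 not exceeding the integer, then extracts the base-1000 digits most-significant-first by dividing by that shrinking power, instead of A's least-significant-first accumulation into a list that is then reversed and joined.
import Mathlib
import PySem

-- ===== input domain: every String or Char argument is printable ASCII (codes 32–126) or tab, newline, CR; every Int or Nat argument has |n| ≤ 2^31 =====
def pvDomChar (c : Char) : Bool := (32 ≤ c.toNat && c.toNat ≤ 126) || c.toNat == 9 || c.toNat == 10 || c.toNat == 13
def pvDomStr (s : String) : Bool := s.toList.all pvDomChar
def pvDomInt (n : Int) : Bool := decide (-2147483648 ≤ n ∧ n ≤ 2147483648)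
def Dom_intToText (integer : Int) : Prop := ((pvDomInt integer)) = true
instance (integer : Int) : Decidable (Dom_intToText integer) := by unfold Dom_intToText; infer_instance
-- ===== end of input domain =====

-- B finds the highest power of 1000 not exceeding the integer and extracts base-1000 digits
-- most-significant-first by dividing by that shrinking power, instead of A's least-significant-first
-- list accumulation followed by reverse+join (objective: alternative).

-- termination lemmas for the ports (cited by name in decreasing_by; kept term-small on purpose)
theorem pvTermDiv (a : Int) (h : 0 < a) : (PySem.Int.floordiv a 1000).toNat < a.toNat := by
  rw [PySem.Int.floordiv_eq_ediv_of_pos (by decide : (0:Int) < 1000)]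
  exact (Int.toNat_lt_toNat h).mpr
    (Int.ediv_lt_of_lt_mul (by decide) (lt_mul_right h (by decide)))

theorem pvTermSub (n p : Int) (h1 : 0 < p) (h2 : 1000 ≤ PySem.Int.floordiv n p) :
    (n - p * 1000).toNat < (n - p).toNat := by
  have h3 : 1000 * p ≤ n := (PySem.Int.le_floordiv_iff_mul_le h1).mp h2
  have h4 : p < p * 1000 := lt_mul_right h1 (by decide)
  have h5 : p * 1000 ≤ n := (mul_comm p 1000) ▸ h3
  exact (Int.toNat_lt_toNat (sub_pos.mpr (lt_of_lt_of_le h4 h5))).mpr (sub_lt_sub_left h4 n)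

-- ===== PORT A =====
-- the while loop: state is (integer, mas); appends chr(integer % 1000) while integer > 0
def intToTextLoop (integer : Int) (mas : List Char) : List Char :=
  if h : integer > 0 then
    intToTextLoop (PySem.Int.floordiv integer 1000)
      (mas ++ [Char.ofNat (PySem.Int.mod integer 1000).toNat])
  else mas
termination_by integer.toNat
decreasing_by exact pvTermDiv integer h

def intToText (integer : Int) : String :=
  String.ofList ((intToTextLoop integer []).reverse)   -- ''.join(mas[::-1])

-- ===== PORT B =====
-- first loop of Source B: p = 1; while integer // p >= 1000: p *= 1000
-- (the 0 < p conjunct is a totality guard only: B always starts at p = 1 > 0)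
def findPow (integer p : Int) : Int :=
  if h : 0 < p ∧ 1000 ≤ PySem.Int.floordiv integer p then findPow integer (p * 1000)
  else p
termination_by (integer - p).toNat
decreasing_by exact pvTermSub integer p h.1 h.2

-- second loop of Source B: while p > 0: chars.append(chr((integer // p) % 1000)); p //= 1000
def digitChars (integer p : Int) : List Char :=
  if h : 0 < p then
    Char.ofNat (PySem.Int.mod (PySem.Int.floordiv integer p) 1000).toNat
      :: digitChars integer (PySem.Int.floordiv p 1000)
  else []
termination_by p.toNat
decreasing_by exact pvTermDiv p h

def intToText_alt (integer : Int) : String :=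
  if integer ≤ 0 then ""
  else String.ofList (digitChars integer (findPow integer 1))

-- ===== PRECONDITION & SPEC =====
def Spec_intToText (integer : Int) (out : String) : Prop := out = intToText_alt integer
instance (integer : Int) (out : String) : Decidable (Spec_intToText integer out) := by unfold Spec_intToText; infer_instance

-- ===== CLAIM (what is proved, stated in full; the proofs are below) =====
def Claim_equal_intToText : Prop := ∀ (integer : Int), Dom_intToText integer → Spec_intToText integer (intToText integer)

-- ===== LEMMAS AND PROOFS =====

-- common characterisation: the base-1000 char string of n, most significant digit first
def repC (n : Int) : List Char :=
  if 0 < n then repC (n / 1000) ++ [Char.ofNat (n % 1000).toNat] else []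
termination_by n.toNat
decreasing_by omega

-- ---- A side ----

theorem intToTextLoop_acc (integer : Int) (mas : List Char) :
    intToTextLoop integer mas = mas ++ intToTextLoop integer [] := by
  by_cases h : integer > 0
  · have l1 : intToTextLoop integer mas =
        intToTextLoop (PySem.Int.floordiv integer 1000)
          (mas ++ [Char.ofNat (PySem.Int.mod integer 1000).toNat]) := by
      rw [intToTextLoop]; simp [h]
    have l2 : intToTextLoop integer [] =
        intToTextLoop (PySem.Int.floordiv integer 1000)
          ([] ++ [Char.ofNat (PySem.Int.mod integer 1000).toNat]) := by
      rw [intToTextLoop]; simp [h]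
    rw [l1, l2, intToTextLoop_acc _ (mas ++ _), intToTextLoop_acc _ ([] ++ _)]
    simp
  · conv_rhs => rw [intToTextLoop]
    rw [intToTextLoop]; simp [h]
termination_by integer.toNat
decreasing_by
  all_goals
    have h1 : PySem.Int.floordiv integer 1000 = integer / 1000 :=
      PySem.Int.floordiv_eq_ediv_of_pos (by omega)
    simp only [h1]; omega

theorem intToTextLoop_rev (integer : Int) :
    (intToTextLoop integer []).reverse = repC integer := by
  by_cases h : integer > 0
  · have hd : PySem.Int.floordiv integer 1000 = integer / 1000 :=
      PySem.Int.floordiv_eq_ediv_of_pos (by omega)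
    have hm : PySem.Int.mod integer 1000 = integer % 1000 :=
      PySem.Int.mod_eq_emod_of_pos (by omega)
    rw [intToTextLoop, dif_pos h, intToTextLoop_acc]
    rw [repC, if_pos h]
    have ih := intToTextLoop_rev (PySem.Int.floordiv integer 1000)
    rw [hd] at ih
    simp [ih]
  · rw [intToTextLoop, dif_neg h, repC, if_neg h]
    rfl
termination_by integer.toNat
decreasing_by
  have h1 : PySem.Int.floordiv integer 1000 = integer / 1000 :=
    PySem.Int.floordiv_eq_ediv_of_pos (by omega)
  simp only [h1]; omega

theorem intToText_eq_repC (integer : Int) :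
    intToText integer = String.ofList (repC integer) := by
  unfold intToText
  rw [intToTextLoop_rev]

-- ---- B side ----

-- unfold the PySem primitives inside digitChars once and for all (all divisors used are positive)
theorem digitChars_pos (n p : Int) (hp : 0 < p) :
    digitChars n p =
      Char.ofNat ((n / p) % 1000).toNat :: digitChars n (p / 1000) := by
  rw [digitChars]
  have hd : PySem.Int.floordiv n p = n / p :=
    PySem.Int.floordiv_eq_ediv_of_pos hp
  have hm : PySem.Int.mod (PySem.Int.floordiv n p) 1000 = (PySem.Int.floordiv n p) % 1000 :=
    PySem.Int.mod_eq_emod_of_pos (by norm_num)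
  have hq : PySem.Int.floordiv p 1000 = p / 1000 :=
    PySem.Int.floordiv_eq_ediv_of_pos (by omega)
  simp [hp]

theorem digitChars_zero (n : Int) : digitChars n 0 = [] := by
  rw [digitChars]; simp

-- the digit extracted at power 1000^(k+1) shifts: one division by 1000 of n, drop one power
theorem digitChars_shift (k : Nat) (n : Int) (hn : 0 ≤ n) :
    digitChars n ((1000 : Int) ^ (k + 1)) =
      digitChars (n / 1000) ((1000 : Int) ^ k) ++ [Char.ofNat ((n % 1000).toNat)] := by
  induction k generalizing n with
  | zero =>
      rw [digitChars_pos n ((1000:Int)^1) (by positivity)]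
      rw [digitChars_pos (n / 1000) ((1000:Int)^0) (by norm_num)]
      norm_num
      rw [digitChars_pos n 1 (by norm_num)]
      norm_num [digitChars_zero]
  | succ k ih =>
      have hdiv : (1000 : Int) ^ (k + 2) / 1000 = (1000 : Int) ^ (k + 1) := by
        rw [pow_succ]
        exact Int.mul_ediv_cancel _ (by norm_num)
      have hdiv2 : (1000 : Int) ^ (k + 1) / 1000 = (1000 : Int) ^ k := by
        rw [pow_succ]
        exact Int.mul_ediv_cancel _ (by norm_num)
      have hhead : n / (1000 : Int) ^ (k + 2) = (n / 1000) / (1000 : Int) ^ (k + 1) := by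
        rw [Int.ediv_ediv_of_nonneg (by norm_num : (0:Int) ≤ 1000)]
        congr 1
        rw [pow_succ]
        ring
      rw [digitChars_pos n ((1000:Int)^(k+2)) (by positivity)]
      rw [digitChars_pos (n / 1000) ((1000:Int)^(k+1)) (by positivity)]
      rw [hdiv, hdiv2, ih n hn, hhead]
      simp

-- when p is exactly the leading power of 1000 of n, the second loop produces repC n
theorem digitChars_eq_repC (k : Nat) (n : Int) (h0 : 0 < n)
    (hlo : (1000 : Int) ^ k ≤ n) (hhi : n < (1000 : Int) ^ (k + 1)) :
    digitChars n ((1000 : Int) ^ k) = repC n := by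
  induction k generalizing n with
  | zero =>
      have hn : n < 1000 := by simpa using hhi
      rw [digitChars_pos n ((1000:Int)^0) (by norm_num)]
      norm_num [digitChars_zero]
      rw [repC, if_pos h0]
      have : n / 1000 = 0 := by omega
      rw [this, repC]
      simp
  | succ k ih =>
      have hq0 : 0 < n / 1000 := by
        have : (1000:Int) ^ (k+1) ≤ n := hlo
        have hk : (0:Int) < 1000 ^ (k+1) := by positivity
        have h1000 : (1000:Int) ≤ 1000 ^ (k+1) := by
          calc (1000:Int) = 1000 ^ 1 := by norm_num
          _ ≤ 1000 ^ (k+1) := by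
            apply pow_le_pow_right₀ (by norm_num) (by omega)
        omega
      have hlo' : (1000 : Int) ^ k ≤ n / 1000 := by
        rw [Int.le_ediv_iff_mul_le (by norm_num : (0:Int) < 1000)]
        calc (1000:Int) ^ k * 1000 = 1000 ^ (k+1) := by rw [pow_succ]
        _ ≤ n := hlo
      have hhi' : n / 1000 < (1000 : Int) ^ (k + 1) := by
        rw [Int.ediv_lt_iff_lt_mul (by norm_num : (0:Int) < 1000)]
        calc n < 1000 ^ (k+2) := hhi
        _ = (1000:Int) ^ (k+1) * 1000 := by rw [pow_succ]
      conv_rhs => rw [repC, if_pos h0]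
      rw [digitChars_shift k n (by omega), ih (n / 1000) hq0 hlo' hhi']

-- the first loop really finds the leading power of 1000
theorem findPow_spec (n p : Int) (hp : 0 < p) (hpn : p ≤ n) :
    ∃ j : Nat, findPow n p = p * 1000 ^ j ∧ p * 1000 ^ j ≤ n ∧ n < p * 1000 ^ (j + 1) := by
  by_cases h : 0 < p ∧ 1000 ≤ PySem.Int.floordiv n p
  · have h2 : 1000 * p ≤ n := (PySem.Int.le_floordiv_iff_mul_le hp).mp h.2
    obtain ⟨j, hj1, hj2, hj3⟩ := findPow_spec n (p * 1000) (by omega) (by omega)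
    refine ⟨j + 1, ?_, ?_, ?_⟩
    · rw [findPow, dif_pos h, hj1]; ring
    · calc p * 1000 ^ (j+1) = p * 1000 * 1000 ^ j := by ring
      _ ≤ n := hj2
    · calc n < p * 1000 * 1000 ^ (j+1) := hj3
      _ = p * 1000 ^ (j+2) := by ring
  · have hlt : PySem.Int.floordiv n p < 1000 := by
      rcases not_and_or.mp h with h' | h'
      · omega
      · omega
    have h3 : n < 1000 * p := (PySem.Int.floordiv_lt_iff_lt_mul hp).mp hlt
    exact ⟨0, by rw [findPow, dif_neg h]; ring_nf, by simpa using hpn, by rw [pow_one]; omega⟩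
termination_by (n - p).toNat
decreasing_by
  have h2 : 1000 * p ≤ n := (PySem.Int.le_floordiv_iff_mul_le hp).mp h.2
  omega

theorem intToText_alt_eq_repC (n : Int) :
    intToText_alt n = String.ofList (repC n) := by
  unfold intToText_alt
  by_cases h : n ≤ 0
  · rw [if_pos h, repC, if_neg (by omega)]
  · rw [if_neg h]
    obtain ⟨j, hj1, hj2, hj3⟩ := findPow_spec n 1 (by norm_num) (by omega)
    rw [hj1]
    simp only [one_mul] at hj1 hj2 hj3 ⊢
    rw [digitChars_eq_repC j n (by omega) hj2 hj3]

-- ===== VERDICT (by name: the statement is the Claim_ definition above) =====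
theorem intToText_spec : Claim_equal_intToText := by
  intro n _
  unfold Spec_intToText
  rw [intToText_eq_repC, intToText_alt_eq_repC]
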